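-- pv_equiv track=rewrite | github.com/pokerdio/generic | euler/euler-691.py | repsg
-- ===== SOURCE A (Python) =====
-- def repsg(v, l):
--     kode = 0
--     minus = 2 ** l
--     for i in range(l):
--         kode = kode * 2 + v[i]
--
--     g = {kode: 1}
--
--     for i in range(l, len(v)):
--         kode = kode * 2 - minus * v[i - l] + v[i]
--         g[kode] = g.get(kode, 0) + 1
--
--     return max(g.values()), g
-- ===== SOURCE B (Python) =====
-- def repsg(v, l):
--     g = {}
--     for i in range(len(v) - l + 1):
--         w = v[i:i + l]
--         code = sum(x * 2 ** (l - 1 - j) for j, x in enumerate(w))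
--         g[code] = g.get(code, 0) + 1
--     return max(g.values()), g
-- ===== Notes on version B (the rewrite author's own statement) =====
-- stated objective: alternative
-- what changed: Replaces the seeded rolling-hash update (kode*2 - 2**l*v[i-l] + v[i]) with a uniform pass that recomputes each window's code directly from the slice v[i:i+l] as a sum of shifted terms; the O(n) rolling loop becomes an O(n*l) recompute-per-window loop with identical keys, insertion order and counts.
import Mathlib
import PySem

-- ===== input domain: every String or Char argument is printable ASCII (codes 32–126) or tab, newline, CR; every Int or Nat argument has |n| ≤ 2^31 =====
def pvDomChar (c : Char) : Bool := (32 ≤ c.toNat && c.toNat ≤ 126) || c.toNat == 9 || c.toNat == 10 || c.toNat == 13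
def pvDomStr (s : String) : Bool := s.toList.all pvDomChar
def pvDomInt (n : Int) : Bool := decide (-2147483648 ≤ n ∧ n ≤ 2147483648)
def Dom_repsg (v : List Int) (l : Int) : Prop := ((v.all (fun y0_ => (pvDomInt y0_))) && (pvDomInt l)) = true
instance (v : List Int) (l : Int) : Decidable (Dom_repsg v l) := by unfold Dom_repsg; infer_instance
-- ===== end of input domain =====

-- B recomputes each window's code directly from the slice v[i:i+l] instead of A's rolling update; same keys, insertion order and counts (alternative decomposition, not faster).

-- ===== PORT A =====
def repsg (v : List Int) (l : Int) : Int × (List (Int × Int)) :=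
  let kode : Int := (PySem.List.pyRange 0 l 1).foldl (fun k i => k * 2 + PySem.List.pyGetD v i 0) 0
  let minus : Int := 2 ^ l.toNat   -- 2 ** l; exact for l ≥ 0 (Pre_ requires it; Python yields a float for l < 0)
  let g : PySem.Dict Int Int := PySem.Dict.empty.insert kode 1
  let st := (PySem.List.pyRange l (v.length : Int) 1).foldl
    (fun (st : Int × PySem.Dict Int Int) i =>
      let k := st.1 * 2 - minus * PySem.List.pyGetD v (i - l) 0 + PySem.List.pyGetD v i 0
      (k, st.2.insert k (st.2.getD k 0 + 1))) (kode, g)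
  ((PySem.List.max? st.2.values (fun y => y)).getD 0, st.2.items)

-- ===== PORT B =====
def repsg_alt (v : List Int) (l : Int) : Int × (List (Int × Int)) :=
  let g := (PySem.List.pyRange 0 ((v.length : Int) - l + 1) 1).foldl
    (fun (g : PySem.Dict Int Int) i =>
      let w := PySem.List.slice v (some i) (some (i + l))
      -- sum(x * 2 ** (l - 1 - j) ...): exponent ≥ 0 on Pre_, so Int exponentiation via .toNat is exact
      let code := ((PySem.List.enumerate w 0).map (fun p => p.2 * 2 ^ (l - 1 - p.1).toNat)).sum
      g.insert code (g.getD code 0 + 1)) PySem.Dict.empty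
  ((PySem.List.max? g.values (fun y => y)).getD 0, g.items)

-- ===== PRECONDITION & SPEC =====
-- Pre_ excludes exactly the inputs where A raises IndexError: l < 0 (the rolling loop reads v[i-l] past the end) and l > len(v) (the initial loop).
def Pre_repsg (v : List Int) (l : Int) : Prop := 0 ≤ l ∧ l ≤ (v.length : Int)
instance (v : List Int) (l : Int) : Decidable (Pre_repsg v l) := by unfold Pre_repsg; infer_instance
def pvWitness_repsg : List Int × Int := ([1, 0, 1, 1, 0], 2)
def Spec_repsg (v : List Int) (l : Int) (out : Int × (List (Int × Int))) : Prop := out = repsg_alt v l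
instance (v : List Int) (l : Int) (out : Int × (List (Int × Int))) : Decidable (Spec_repsg v l out) := by unfold Spec_repsg; infer_instance

-- ===== CLAIM (what is proved, stated in full; the proofs are below) =====
def Claim_equal_repsg : Prop := ∀ (v : List Int) (l : Int), Dom_repsg v l → Pre_repsg v l → Spec_repsg v l (repsg v l)

-- ===== LEMMAS AND PROOFS =====

-- the value A's Horner loop assigns to a window
def pvHorner (w : List Int) : Int := w.foldl (fun k x => k * 2 + x) 0

-- code of the window of length L starting at position k
def pvCodeAt (v : List Int) (L k : Nat) : Int := pvHorner ((v.drop k).take L)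

-- the dict-update step shared by both loops
def pvStepD (g : PySem.Dict Int Int) (c : Int) : PySem.Dict Int Int := g.insert c (g.getD c 0 + 1)

theorem pvHorner_init (w : List Int) (a : Int) :
    w.foldl (fun k x => k * 2 + x) a = a * 2 ^ w.length + pvHorner w := by
  induction w generalizing a with
  | nil => simp [pvHorner]
  | cons x t ih =>
    simp only [List.foldl_cons, pvHorner]
    rw [ih (a * 2 + x), ih (0 * 2 + x)]
    simp [List.length_cons, pow_succ]
    ring

theorem pvHorner_append (w : List Int) (x : Int) :
    pvHorner (w ++ [x]) = pvHorner w * 2 + x := by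
  simp [pvHorner]

-- B's per-window sum of shifted terms equals A's Horner value of the same window
theorem pvEnumSum_eq_horner (w : List Int) :
    ((PySem.List.enumerate w 0).map
      (fun p => p.2 * 2 ^ (((w.length : Int)) - 1 - p.1).toNat)).sum = pvHorner w := by
  induction w using List.reverseRecOn with
  | nil => simp [pvHorner]
  | append_singleton t x ih =>
    rw [PySem.List.enumerate_append]
    have hlen : ((t ++ [x]).length : Int) = (t.length : Int) + 1 := by simp
    rw [pvHorner_append, ← ih]
    simp only [List.map_append, List.sum_append, hlen]
    have h1 : (PySem.List.enumerate [x] (0 + (t.length : Int))).map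
        (fun p => p.2 * 2 ^ ((t.length : Int) + 1 - 1 - p.1).toNat) = [x] := by
      simp [PySem.List.enumerate]
    have h2 : (PySem.List.enumerate t 0).map
        (fun p => p.2 * 2 ^ ((t.length : Int) + 1 - 1 - p.1).toNat)
        = (PySem.List.enumerate t 0).map
          (fun p => 2 * (p.2 * 2 ^ ((t.length : Int) - 1 - p.1).toNat)) := by
      apply List.map_congr_left
      intro p hp
      rcases (PySem.List.mem_enumerate_iff t 0 p).mp hp with ⟨k, hk, rfl⟩
      have hexp : ((t.length : Int) + 1 - 1 - (0 + (k : Int))).toNat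
          = ((t.length : Int) - 1 - (0 + (k : Int))).toNat + 1 := by omega
      rw [hexp, pow_succ]
      ring
    rw [h1, h2, List.sum_map_mul_left]
    simp
    ring

-- A's initial loop computes the code of the first window
theorem pvRangeFoldl_horner (v : List Int) (L : Nat) (h : L ≤ v.length) :
    (List.range L).foldl (fun k j => k * 2 + v.getD j 0) 0 = pvHorner (v.take L) := by
  induction L with
  | zero => simp [pvHorner]
  | succ m ih =>
    have hm : m ≤ v.length := by omega
    rw [List.range_succ, List.foldl_append, ih hm]
    have hvm : v[m]? = some (v.getD m 0) := by
      rw [List.getD_eq_getElem _ _ (by omega)]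
      exact List.getElem?_eq_getElem (by omega)
    have htake : v.take (m + 1) = v.take m ++ [v.getD m 0] := by
      rw [List.take_add_one, hvm]; rfl
    rw [htake, pvHorner_append]
    simp

theorem pvWindow_len (v : List Int) (L k : Nat) (h : k + L ≤ v.length) :
    ((v.drop k).take L).length = L := by
  simp [List.length_take, List.length_drop]; omega

-- the rolling recurrence
theorem pvRoll (v : List Int) (L k : Nat) (h : k + L + 1 ≤ v.length) :
    pvCodeAt v L (k + 1)
      = pvCodeAt v L k * 2 - 2 ^ L * v.getD k 0 + v.getD (k + L) 0 := by
  cases L with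
  | zero => simp [pvCodeAt, pvHorner]
  | succ M =>
    have hk : k < v.length := by omega
    have hkM : k + 1 + M < v.length := by omega
    have hdrop : v.drop k = v[k] :: v.drop (k + 1) := List.drop_eq_getElem_cons hk
    have hwin : (v.drop k).take (M + 1) = v[k] :: (v.drop (k + 1)).take M := by
      rw [hdrop]; rfl
    have htlen : ((v.drop (k + 1)).take M).length = M := pvWindow_len v M (k + 1) (by omega)
    have hA : pvCodeAt v (M + 1) k
        = v[k] * 2 ^ M + pvHorner ((v.drop (k + 1)).take M) := by
      show pvHorner ((v.drop k).take (M + 1)) = _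
      rw [hwin]
      show ((v.drop (k+1)).take M).foldl (fun a x => a * 2 + x) (0 * 2 + v[k]) = _
      rw [pvHorner_init, htlen]
      ring
    have hgetM : (v.drop (k + 1))[M]? = some (v.getD (k + 1 + M) 0) := by
      rw [List.getElem?_drop]
      rw [List.getD_eq_getElem _ _ (by omega)]
      exact List.getElem?_eq_getElem (by omega)
    have hB : pvCodeAt v (M + 1) (k + 1)
        = pvHorner ((v.drop (k + 1)).take M) * 2 + v.getD (k + 1 + M) 0 := by
      show pvHorner ((v.drop (k + 1)).take (M + 1)) = _
      rw [List.take_add_one, hgetM]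
      simp [pvHorner_append]
    rw [hA, hB]
    have hgk : v.getD k 0 = v[k] := List.getD_eq_getElem _ _ hk
    rw [hgk]
    rw [show k + (M + 1) = k + 1 + M by omega, pow_succ]
    ring

-- A's main loop: state after c iterations
theorem pvALoop (v : List Int) (L : Nat) (d0 : PySem.Dict Int Int) (c : Nat)
    (h : c + L ≤ v.length) :
    (PySem.List.pyRange (L : Int) ((L : Int) + (c : Nat)) 1).foldl
      (fun (st : Int × PySem.Dict Int Int) i =>
        let k := st.1 * 2 - 2 ^ L * PySem.List.pyGetD v (i - (L : Int)) 0
                  + PySem.List.pyGetD v i 0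
        (k, st.2.insert k (st.2.getD k 0 + 1))) (pvCodeAt v L 0, d0)
    = (pvCodeAt v L c,
       ((List.range c).map (fun k => pvCodeAt v L (k + 1))).foldl pvStepD d0) := by
  induction c with
  | zero =>
    rw [show ((L : Int) + ((0 : Nat) : Int)) = (L : Int) by omega,
        PySem.List.pyRange_one_eq_nil (le_refl _)]
    simp
  | succ m ih =>
    have hm : m + L ≤ v.length := by omega
    have hcast : ((L : Int) + ((m + 1 : Nat) : Int)) = ((L : Int) + (m : Nat)) + 1 := by
      push_cast; ring
    rw [hcast, PySem.List.pyRange_one_succ_right (by omega), List.foldl_append, ih hm]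
    simp only [List.foldl_cons, List.foldl_nil]
    have hg1 : (L : Int) + (m : Nat) - (L : Int) = ((m : Nat) : Int) := by omega
    have hg2 : (L : Int) + ((m : Nat) : Int) = (((L + m : Nat)) : Int) := by push_cast; ring
    rw [hg1, hg2, PySem.List.pyGetD_natCast, PySem.List.pyGetD_natCast]
    have hroll : pvCodeAt v L m * 2 - 2 ^ L * v.getD m 0 + v.getD (L + m) 0
        = pvCodeAt v L (m + 1) := by
      rw [pvRoll v L m (by omega), show m + L = L + m by omega]
    rw [List.range_succ, List.map_append, List.foldl_append]
    simp only [List.map_cons, List.map_nil, List.foldl_cons, List.foldl_nil]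
    rw [hroll]
    rfl

-- B's loop folds the codes of all windows, in order, into the dict
theorem pvBLoop (v : List Int) (L : Nat) (h : L ≤ v.length) :
    (PySem.List.pyRange 0 ((v.length : Int) - (L : Int) + 1) 1).foldl
      (fun (g : PySem.Dict Int Int) i =>
        let w := PySem.List.slice v (some i) (some (i + (L : Int)))
        let code := ((PySem.List.enumerate w 0).map
          (fun p => p.2 * 2 ^ ((L : Int) - 1 - p.1).toNat)).sum
        g.insert code (g.getD code 0 + 1)) PySem.Dict.empty
    = ((List.range (v.length - L + 1)).map (fun k => pvCodeAt v L k)).foldl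
        pvStepD PySem.Dict.empty := by
  have hcast : (v.length : Int) - (L : Int) + 1 = ((v.length - L + 1 : Nat) : Int) := by
    push_cast [h]; omega
  rw [hcast, PySem.List.pyRange_zero_nat, List.foldl_map, List.foldl_map]
  apply PySem.List.foldl_congr_mem
  intro acc j hj
  have hjle : j + L ≤ v.length := by
    have := List.mem_range.mp hj; omega
  have hslice : PySem.List.slice v (some (j : Int)) (some ((j : Int) + (L : Int)))
      = (v.drop j).take L := PySem.List.slice_natCast_add v j L
  simp only [hslice]
  have hwl : ((v.drop j).take L).length = L := pvWindow_len v L j hjle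
  have hcode : ((PySem.List.enumerate ((v.drop j).take L) 0).map
      (fun p => p.2 * 2 ^ ((L : Int) - 1 - p.1).toNat)).sum = pvCodeAt v L j := by
    rw [show (L : Int) = (((v.drop j).take L).length : Int) by rw [hwl]]
    exact pvEnumSum_eq_horner _
  rw [hcode]
  rfl

-- ===== VERDICT (by name: the statement is the Claim_ definition above) =====
theorem repsg_spec : Claim_equal_repsg := by
  intro v l _ hpre
  obtain ⟨h0, h1⟩ := hpre
  unfold Spec_repsg repsg repsg_alt
  obtain ⟨L, rfl⟩ : ∃ L : Nat, l = (L : Int) := ⟨l.toNat, (Int.toNat_of_nonneg h0).symm⟩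
  have hLlen : L ≤ v.length := by omega
  -- A's initial loop computes the first window's code
  have hkode : (PySem.List.pyRange 0 (L : Int) 1).foldl
      (fun k i => k * 2 + PySem.List.pyGetD v i 0) 0 = pvCodeAt v L 0 := by
    rw [PySem.List.pyRange_zero_nat, List.foldl_map]
    have : ∀ (acc : Int), ∀ j ∈ List.range L,
        acc * 2 + PySem.List.pyGetD v ((j : Nat) : Int) 0 = acc * 2 + v.getD j 0 := by
      intro acc j _; rw [PySem.List.pyGetD_natCast]
    rw [PySem.List.foldl_congr_mem _ _ _ _ this, pvRangeFoldl_horner v L hLlen]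
    simp [pvCodeAt]
  simp only [Int.toNat_natCast, hkode]
  -- rewrite A's range bound as L + (len - L)
  have hbound : (v.length : Int) = (L : Int) + ((v.length - L : Nat) : Int) := by
    omega
  rw [pvBLoop v L hLlen]
  rw [hbound, pvALoop v L (PySem.Dict.empty.insert (pvCodeAt v L 0) 1)
        (v.length - L) (by omega)]
  -- both dicts are the same fold over the same list of codes
  have hseed : PySem.Dict.empty.insert (pvCodeAt v L 0) 1
      = pvStepD PySem.Dict.empty (pvCodeAt v L 0) := by
    simp [pvStepD, PySem.Dict.getD_empty]
  have hlist : ((List.range (v.length - L + 1)).map (fun k => pvCodeAt v L k))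
      = pvCodeAt v L 0 :: ((List.range (v.length - L)).map (fun k => pvCodeAt v L (k + 1))) := by
    rw [List.range_succ_eq_map, List.map_cons, List.map_map]
    rfl
  rw [hlist, List.foldl_cons, ← hseed]
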